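-- pv_equiv track=rewrite | github.com/skkuaws0229-prog/colon_drug_repurposing | 20260414_re_pre_project_v3/step4_results/fix_step6_issues.py | infer_subtype_enhanced
-- ===== SOURCE A (Python) =====
-- SUBTYPE_TARGETS = {
--     'ER+': ['ESR1', 'PGR', 'HDAC', 'MTOR', 'CDK4', 'CDK6', 'PIK3CA', 'AKT1', 'CCND1'],
--     'HER2+': ['ERBB2', 'EGFR', 'FGFR', 'MTOR', 'PIK3CA', 'AKT1'],
--     'TNBC': ['BRCA1', 'BRCA2', 'AR', 'TNKS', 'IKK', 'Microtubule', 'TOP1', 'TOP2', 'EGFR', 'BCL2', 'MYC', 'TP53', 'PARP1', 'CHEK1', 'ATM'],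
-- }
--
-- def infer_subtype_enhanced(matched_targets):
--     """Infer subtypes from matched targets"""
--     if not matched_targets:
--         return ['Unknown']
--
--     subtypes = []
--     for subtype, markers in SUBTYPE_TARGETS.items():
--         if any(m in matched_targets for m in markers):
--             subtypes.append(subtype)
--
--     return subtypes if subtypes else ['Unknown']
-- ===== SOURCE B (Python) =====
-- SUBTYPE_TARGETS = {
--     'ER+': ['ESR1', 'PGR', 'HDAC', 'MTOR', 'CDK4', 'CDK6', 'PIK3CA', 'AKT1', 'CCND1'],
--     'HER2+': ['ERBB2', 'EGFR', 'FGFR', 'MTOR', 'PIK3CA', 'AKT1'],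
--     'TNBC': ['BRCA1', 'BRCA2', 'AR', 'TNKS', 'IKK', 'Microtubule', 'TOP1', 'TOP2', 'EGFR', 'BCL2', 'MYC', 'TP53', 'PARP1', 'CHEK1', 'ATM'],
-- }
--
-- # Inverted index: marker gene -> subtypes (in SUBTYPE_TARGETS key order) containing it.
-- _MARKER_INDEX = {}
-- for _s, _markers in SUBTYPE_TARGETS.items():
--     for _m in _markers:
--         _MARKER_INDEX.setdefault(_m, []).append(_s)
--
--
-- def infer_subtype_enhanced(matched_targets):
--     """Infer subtypes from matched targets"""
--     if not matched_targets:
--         return ['Unknown']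
--
--     found = set()
--     for t in matched_targets:
--         found.update(_MARKER_INDEX.get(t, ()))
--
--     result = [s for s in SUBTYPE_TARGETS if s in found]
--     return result if result else ['Unknown']
-- ===== Notes on version B (the rewrite author's own statement) =====
-- stated objective: faster
-- what changed: Replaces the per-subtype scan of all marker lists against matched_targets with a precomputed inverted index (marker -> subtypes): one pass over matched_targets with O(1) dict lookups collects hit subtypes into a set, emitted in SUBTYPE_TARGETS key order.
import Mathlib
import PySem

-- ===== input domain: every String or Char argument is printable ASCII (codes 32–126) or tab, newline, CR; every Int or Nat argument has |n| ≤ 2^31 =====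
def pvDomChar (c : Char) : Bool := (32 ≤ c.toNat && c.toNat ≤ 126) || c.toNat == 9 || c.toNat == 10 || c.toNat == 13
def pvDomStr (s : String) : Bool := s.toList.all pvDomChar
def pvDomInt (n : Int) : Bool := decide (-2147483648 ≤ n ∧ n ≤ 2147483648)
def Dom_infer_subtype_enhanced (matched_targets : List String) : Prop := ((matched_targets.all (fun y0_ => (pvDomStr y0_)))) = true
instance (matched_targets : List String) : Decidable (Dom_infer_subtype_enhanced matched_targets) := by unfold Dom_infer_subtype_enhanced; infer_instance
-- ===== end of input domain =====

-- B replaces A's per-subtype scan of marker lists with a precomputed inverted index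
-- (marker -> subtypes) consulted once per matched target (measured faster in a timing run).

-- ===== PORT A =====
def subtypeTargets : List (String × List String) :=
  [("ER+", ["ESR1", "PGR", "HDAC", "MTOR", "CDK4", "CDK6", "PIK3CA", "AKT1", "CCND1"]),
   ("HER2+", ["ERBB2", "EGFR", "FGFR", "MTOR", "PIK3CA", "AKT1"]),
   ("TNBC", ["BRCA1", "BRCA2", "AR", "TNKS", "IKK", "Microtubule", "TOP1", "TOP2", "EGFR", "BCL2", "MYC", "TP53", "PARP1", "CHEK1", "ATM"])]

def infer_subtype_enhanced (matched_targets : List String) : List String :=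
  if matched_targets = [] then ["Unknown"]
  else
    let subtypes := subtypeTargets.foldl
      (fun acc p => if p.2.any (fun m => matched_targets.contains m) then acc ++ [p.1] else acc) []
    if subtypes = [] then ["Unknown"] else subtypes

-- ===== PORT B =====
-- module-level loop of Source B: d.setdefault(m, []).append(s)
def markerIndex : PySem.Dict String (List String) :=
  subtypeTargets.foldl
    (fun d p => p.2.foldl (fun d m => d.insert m ((d.getD m []) ++ [p.1])) d)
    PySem.Dict.empty

def infer_subtype_enhanced_alt (matched_targets : List String) : List String :=
  if matched_targets = [] then ["Unknown"]
  else
    let found : PySem.Set String :=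
      matched_targets.foldl (fun s t => PySem.Set.update s (markerIndex.getD t [])) PySem.Set.empty
    let result := (subtypeTargets.map (·.1)).filter (fun s => PySem.Set.contains found s)
    if result = [] then ["Unknown"] else result

-- ===== PRECONDITION & SPEC =====
def Spec_infer_subtype_enhanced (matched_targets : List String) (out : List String) : Prop := out = infer_subtype_enhanced_alt matched_targets
instance (matched_targets : List String) (out : List String) : Decidable (Spec_infer_subtype_enhanced matched_targets out) := by unfold Spec_infer_subtype_enhanced; infer_instance

-- ===== CLAIM (what is proved, stated in full; the proofs are below) =====
def Claim_equal_infer_subtype_enhanced : Prop := ∀ (matched_targets : List String), Dom_infer_subtype_enhanced matched_targets → Spec_infer_subtype_enhanced matched_targets (infer_subtype_enhanced matched_targets)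

-- ===== LEMMAS AND PROOFS =====

-- membership in the set accumulated by B's loop
theorem mem_found (mt : List String) (acc : PySem.Set String) (x : String) :
    x ∈ mt.foldl (fun s t => PySem.Set.update s (markerIndex.getD t [])) acc ↔
      x ∈ acc ∨ ∃ t ∈ mt, x ∈ markerIndex.getD t [] := by
  induction mt generalizing acc with
  | nil => simp
  | cons h tl ih =>
    simp only [List.foldl_cons, ih, PySem.Set.mem_update, List.mem_cons]
    constructor
    · rintro (⟨hx | hx⟩ | ⟨t, ht, hx⟩)
      · exact Or.inl hx
      · exact Or.inr ⟨h, Or.inl rfl, hx⟩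
      · exact Or.inr ⟨t, Or.inr ht, hx⟩
    · rintro (hx | ⟨t, (rfl | ht), hx⟩)
      · exact Or.inl (Or.inl hx)
      · exact Or.inl (Or.inr hx)
      · exact Or.inr ⟨t, ht, hx⟩

set_option maxHeartbeats 4000000 in
set_option maxHeartbeats 4000000 in
theorem markerIndex_eq : markerIndex = PySem.Dict.mk
      [("ESR1", ["ER+"]), ("PGR", ["ER+"]), ("HDAC", ["ER+"]), ("MTOR", ["ER+", "HER2+"]),
       ("CDK4", ["ER+"]), ("CDK6", ["ER+"]), ("PIK3CA", ["ER+", "HER2+"]), ("AKT1", ["ER+", "HER2+"]),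
       ("CCND1", ["ER+"]), ("ERBB2", ["HER2+"]), ("EGFR", ["HER2+", "TNBC"]), ("FGFR", ["HER2+"]),
       ("BRCA1", ["TNBC"]), ("BRCA2", ["TNBC"]), ("AR", ["TNBC"]), ("TNKS", ["TNBC"]),
       ("IKK", ["TNBC"]), ("Microtubule", ["TNBC"]), ("TOP1", ["TNBC"]), ("TOP2", ["TNBC"]),
       ("BCL2", ["TNBC"]), ("MYC", ["TNBC"]), ("TP53", ["TNBC"]), ("PARP1", ["TNBC"]),
       ("CHEK1", ["TNBC"]), ("ATM", ["TNBC"])] := by rfl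

theorem mem_getD_assoc (l : List (String × List String)) (t K : String)
    (hnd : (l.map Prod.fst).Nodup) :
    K ∈ (PySem.Dict.mk l).getD t [] ↔ ∃ p ∈ l, p.1 = t ∧ K ∈ p.2 := by
  induction l with
  | nil =>
    simp [PySem.Dict.getD_eq_get?_getD, show (PySem.Dict.mk ([] : List (String × List String))).get? t = none from rfl]
  | cons hd tl ih =>
    obtain ⟨k, v⟩ := hd
    simp only [List.map_cons, List.nodup_cons] at hnd
    rw [PySem.Dict.getD_eq_get?_getD, PySem.Dict.get?_mk_cons]
    by_cases hk : k = t
    · subst hk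
      simp only [beq_self_eq_true, if_pos, Option.getD_some]
      constructor
      · intro hKv; exact ⟨(k, v), List.mem_cons_self, rfl, hKv⟩
      · rintro ⟨⟨k', v'⟩, hp, rfl, hKv⟩
        rcases List.mem_cons.mp hp with heq | hmem
        · cases heq; exact hKv
        · exact absurd (List.mem_map.mpr ⟨(k', v'), hmem, rfl⟩) hnd.1
    · rw [if_neg (by simpa using hk), ← PySem.Dict.getD_eq_get?_getD, ih hnd.2]
      constructor
      · rintro ⟨p, hp, hpt, hK⟩; exact ⟨p, List.mem_cons_of_mem _ hp, hpt, hK⟩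
      · rintro ⟨p, hp, hpt, hK⟩
        rcases List.mem_cons.mp hp with heq | hmem
        · subst heq; exact absurd hpt hk
        · exact ⟨p, hmem, hpt, hK⟩

set_option maxHeartbeats 1000000 in
theorem idx_ER (t : String) : "ER+" ∈ markerIndex.getD t [] ↔
    t ∈ ["ESR1", "PGR", "HDAC", "MTOR", "CDK4", "CDK6", "PIK3CA", "AKT1", "CCND1"] := by
  rw [markerIndex_eq, mem_getD_assoc _ _ _ (by decide)]
  constructor
  · intro h
    simp only [List.mem_cons, List.not_mem_nil, or_false] at h
    obtain ⟨p, hp, rfl, hK⟩ := h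
    rcases hp with rfl|rfl|rfl|rfl|rfl|rfl|rfl|rfl|rfl|rfl|rfl|rfl|rfl|rfl|rfl|rfl|rfl|rfl|rfl|rfl|rfl|rfl|rfl|rfl|rfl|rfl <;> revert hK <;> decide
  · intro h
    simp only [List.mem_cons, List.not_mem_nil, or_false] at h
    rcases h with rfl|rfl|rfl|rfl|rfl|rfl|rfl|rfl|rfl <;> decide

set_option maxHeartbeats 1000000 in
theorem idx_HER2 (t : String) : "HER2+" ∈ markerIndex.getD t [] ↔
    t ∈ ["ERBB2", "EGFR", "FGFR", "MTOR", "PIK3CA", "AKT1"] := by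
  rw [markerIndex_eq, mem_getD_assoc _ _ _ (by decide)]
  constructor
  · intro h
    simp only [List.mem_cons, List.not_mem_nil, or_false] at h
    obtain ⟨p, hp, rfl, hK⟩ := h
    rcases hp with rfl|rfl|rfl|rfl|rfl|rfl|rfl|rfl|rfl|rfl|rfl|rfl|rfl|rfl|rfl|rfl|rfl|rfl|rfl|rfl|rfl|rfl|rfl|rfl|rfl|rfl <;> revert hK <;> decide
  · intro h
    simp only [List.mem_cons, List.not_mem_nil, or_false] at h
    rcases h with rfl|rfl|rfl|rfl|rfl|rfl <;> decide

set_option maxHeartbeats 1000000 in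
theorem idx_TNBC (t : String) : "TNBC" ∈ markerIndex.getD t [] ↔
    t ∈ ["BRCA1", "BRCA2", "AR", "TNKS", "IKK", "Microtubule", "TOP1", "TOP2", "EGFR", "BCL2", "MYC", "TP53", "PARP1", "CHEK1", "ATM"] := by
  rw [markerIndex_eq, mem_getD_assoc _ _ _ (by decide)]
  constructor
  · intro h
    simp only [List.mem_cons, List.not_mem_nil, or_false] at h
    obtain ⟨p, hp, rfl, hK⟩ := h
    rcases hp with rfl|rfl|rfl|rfl|rfl|rfl|rfl|rfl|rfl|rfl|rfl|rfl|rfl|rfl|rfl|rfl|rfl|rfl|rfl|rfl|rfl|rfl|rfl|rfl|rfl|rfl <;> revert hK <;> decide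
  · intro h
    simp only [List.mem_cons, List.not_mem_nil, or_false] at h
    rcases h with rfl|rfl|rfl|rfl|rfl|rfl|rfl|rfl|rfl|rfl|rfl|rfl|rfl|rfl|rfl <;> decide

-- B's per-subtype condition equals A's
theorem cond_eq (mt : List String) (K : String) (M : List String)
    (hidx : ∀ t, K ∈ markerIndex.getD t [] ↔ t ∈ M) :
    (PySem.Set.contains
        (mt.foldl (fun s t => PySem.Set.update s (markerIndex.getD t [])) PySem.Set.empty) K) =
      M.any (fun m => mt.contains m) := by
  have hL : ((mt.foldl (fun s t => PySem.Set.update s (markerIndex.getD t [])) PySem.Set.empty).contains K = true)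
      ↔ ∃ t ∈ mt, t ∈ M := by
    rw [PySem.Set.contains_iff, mem_found]
    constructor
    · rintro (h | ⟨t, ht, hK⟩)
      · exact absurd h (List.not_mem_nil)
      · exact ⟨t, ht, (hidx t).mp hK⟩
    · rintro ⟨t, ht, hm⟩
      exact Or.inr ⟨t, ht, (hidx t).mpr hm⟩
  have hR : (M.any (fun m => mt.contains m) = true) ↔ ∃ t ∈ mt, t ∈ M := by
    simp only [List.any_eq_true, List.contains_eq_mem, decide_eq_true_eq]
    exact ⟨fun ⟨m, hm, hmt⟩ => ⟨m, hmt, hm⟩, fun ⟨t, ht, hm⟩ => ⟨t, hm, ht⟩⟩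
  exact Bool.eq_iff_iff.mpr (hL.trans hR.symm)

-- ===== VERDICT (by name: the statement is the Claim_ definition above) =====
theorem infer_subtype_enhanced_spec : Claim_equal_infer_subtype_enhanced := by
  intro mt _
  unfold Spec_infer_subtype_enhanced infer_subtype_enhanced infer_subtype_enhanced_alt
  by_cases hmt : mt = []
  · simp [hmt]
  · simp only [if_neg hmt]
    have h1 := cond_eq mt "ER+" _ idx_ER
    have h2 := cond_eq mt "HER2+" _ idx_HER2
    have h3 := cond_eq mt "TNBC" _ idx_TNBC
    simp only [subtypeTargets, List.foldl_cons, List.foldl_nil, List.map_cons, List.map_nil,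
      List.filter_cons, List.filter_nil, h1, h2, h3]
    split_ifs <;> simp_all
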